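-- pv_equiv track=rewrite | github.com/pivarsha/New-folder | main.py | find_synonym_groups
-- ===== SOURCE A (Python) =====
-- def find_synonym_groups(synonyms):
--     groups = []
--     visited = set()
--
--     def dfs(synonym):
--         if synonym in visited:
--             return
--         visited.add(synonym)
--         group = [synonym]
--         for map in synonyms:
--             if synonym in map:
--                 for s in map:
--                     if s != synonym:
--                         group.append(s)
--                         dfs(s)
--         groups.append(group)
--
--     for map in synonyms:
--         for s in map:
--             dfs(s)
--
--     return groups
-- ===== SOURCE B (Python) =====
-- def find_synonym_groups(synonyms):
--     # Index each synonym to the list of maps containing it (in order), so the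
--     # DFS touches only relevant maps instead of scanning every map per node.
--     idx = {}
--     for m in synonyms:
--         for s in dict.fromkeys(m):
--             idx.setdefault(s, []).append(m)
--
--     groups = []
--     visited = set()
--
--     def dfs(s):
--         if s in visited:
--             return
--         visited.add(s)
--         neighbors = [t for m in idx.get(s, []) for t in m if t != s]
--         for t in neighbors:
--             dfs(t)
--         groups.append([s] + neighbors)
--
--     for m in synonyms:
--         for s in m:
--             dfs(s)
--
--     return groups
-- ===== Notes on version B (the rewrite author's own statement) =====
-- stated objective: faster
-- what changed: B precomputes once a dict mapping each synonym to the (deduplicated) list of maps containing it, so the DFS iterates only the relevant maps and builds the neighbor list up front instead of rescanning every map for every node.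
import Mathlib
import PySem

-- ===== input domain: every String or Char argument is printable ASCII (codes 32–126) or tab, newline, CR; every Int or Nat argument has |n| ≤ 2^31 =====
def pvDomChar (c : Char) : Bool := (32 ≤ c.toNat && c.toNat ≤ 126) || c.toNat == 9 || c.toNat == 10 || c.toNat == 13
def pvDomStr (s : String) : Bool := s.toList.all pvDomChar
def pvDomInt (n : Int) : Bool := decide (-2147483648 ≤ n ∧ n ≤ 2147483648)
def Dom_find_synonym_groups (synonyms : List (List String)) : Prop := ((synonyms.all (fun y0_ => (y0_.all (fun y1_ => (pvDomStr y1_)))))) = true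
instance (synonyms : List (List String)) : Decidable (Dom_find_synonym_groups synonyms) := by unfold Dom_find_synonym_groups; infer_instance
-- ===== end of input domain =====

-- B precomputes a synonym→maps index so the DFS only touches relevant maps: asymptotically faster, same return value.

-- ===== PORT A =====
-- state = (visited, groups); fuel is only a termination guard: recursion depth is
-- bounded by the number of distinct synonyms + 1 ≤ total length + 1.
def pvDfsA (synonyms : List (List String)) :
    Nat → String → (PySem.Set String × List (List String)) → (PySem.Set String × List (List String))
  | 0, _, st => st
  | fuel+1, s, (v, g) =>
    if s ∈ v then (v, g)
    else
      let v := PySem.Set.add v s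
      let r := synonyms.foldl
        (fun (acc : List String × (PySem.Set String × List (List String))) m =>
          if s ∈ m then
            m.foldl (fun acc t => if t ≠ s then (acc.1 ++ [t], pvDfsA synonyms fuel t acc.2) else acc) acc
          else acc)
        ([s], (v, g))
      (r.2.1, r.2.2 ++ [r.1])

def find_synonym_groups (synonyms : List (List String)) : List (List String) :=
  let fuel := (synonyms.map List.length).sum + 1
  let st := synonyms.foldl (fun st m => m.foldl (fun st s => pvDfsA synonyms fuel s st) st)
    ((PySem.Set.empty : PySem.Set String), [])
  st.2

-- ===== PORT B =====
-- idx maps each synonym to the maps containing it, in order (dict.fromkeys dedupes within a map)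
def pvIdxB (synonyms : List (List String)) : PySem.Dict String (List (List String)) :=
  synonyms.foldl
    (fun d m => (PySem.List.dedup m).foldl (fun d s => d.insert s (d.getD s [] ++ [m])) d)
    PySem.Dict.empty

def pvDfsB (idx : PySem.Dict String (List (List String))) :
    Nat → String → (PySem.Set String × List (List String)) → (PySem.Set String × List (List String))
  | 0, _, st => st
  | fuel+1, s, (v, g) =>
    if s ∈ v then (v, g)
    else
      let v := PySem.Set.add v s
      let neighbors := (idx.getD s []).flatMap (fun m => m.filter (fun t => t ≠ s))
      let st := neighbors.foldl (fun st t => pvDfsB idx fuel t st) (v, g)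
      (st.1, st.2 ++ [s :: neighbors])

def find_synonym_groups_alt (synonyms : List (List String)) : List (List String) :=
  let idx := pvIdxB synonyms
  let fuel := (synonyms.map List.length).sum + 1
  let st := synonyms.foldl (fun st m => m.foldl (fun st s => pvDfsB idx fuel s st) st)
    ((PySem.Set.empty : PySem.Set String), [])
  st.2

-- ===== PRECONDITION & SPEC =====
def Spec_find_synonym_groups (synonyms : List (List String)) (out : List (List String)) : Prop := out = find_synonym_groups_alt synonyms
instance (synonyms : List (List String)) (out : List (List String)) : Decidable (Spec_find_synonym_groups synonyms out) := by unfold Spec_find_synonym_groups; infer_instance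

-- ===== CLAIM (what is proved, stated in full; the proofs are below) =====
def Claim_equal_find_synonym_groups : Prop := ∀ (synonyms : List (List String)), Dom_find_synonym_groups synonyms → Spec_find_synonym_groups synonyms (find_synonym_groups synonyms)

-- ===== LEMMAS AND PROOFS =====

theorem pvIns_fold (m : List String) (ks : List String) (hnd : ks.Nodup)
    (d : PySem.Dict String (List (List String))) (s : String) :
    (ks.foldl (fun d t => d.insert t (d.getD t [] ++ [m])) d).getD s []
      = d.getD s [] ++ (if s ∈ ks then [m] else []) := by
  induction ks generalizing d with
  | nil => simp
  | cons k ks ih =>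
    rw [List.nodup_cons] at hnd
    rw [List.foldl_cons, ih hnd.2]
    by_cases hs : s = k
    · subst hs
      simp [fun h => hnd.1 h]
    · simp [PySem.Dict.getD_insert, hs]

theorem pvIdx_inner (m : List String) (d : PySem.Dict String (List (List String))) (s : String) :
    ((PySem.List.dedup m).foldl (fun d t => d.insert t (d.getD t [] ++ [m])) d).getD s []
      = d.getD s [] ++ (if s ∈ m then [m] else []) := by
  rw [pvIns_fold m _ (PySem.List.nodup_dedup m) d s]
  simp

theorem pvIdx_fold (l : List (List String)) (d : PySem.Dict String (List (List String))) (s : String) :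
    (l.foldl (fun d m => (PySem.List.dedup m).foldl (fun d t => d.insert t (d.getD t [] ++ [m])) d) d).getD s []
      = d.getD s [] ++ l.filter (fun m => s ∈ m) := by
  induction l generalizing d with
  | nil => simp
  | cons m l ih =>
    rw [List.foldl_cons, ih, pvIdx_inner]
    by_cases hm : s ∈ m <;> simp [hm]

theorem pvPairFold (m : List String) (s : String)
    (f : String → (PySem.Set String × List (List String)) → (PySem.Set String × List (List String)))
    (g0 : List String) (st0 : PySem.Set String × List (List String)) :
    m.foldl (fun acc t => if t ≠ s then (acc.1 ++ [t], f t acc.2) else acc) (g0, st0)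
      = (g0 ++ m.filter (fun t => t ≠ s),
         (m.filter (fun t => t ≠ s)).foldl (fun st t => f t st) st0) := by
  induction m generalizing g0 st0 with
  | nil => simp
  | cons t m ih =>
    rw [List.foldl_cons]
    by_cases ht : t = s
    · rw [if_neg (by simp [ht]), ih]
      simp [ht]
    · rw [if_pos ht, ih]
      simp [ht]

theorem pvGuardedFolds (ms : List (List String)) (s : String)
    (f : String → (PySem.Set String × List (List String)) → (PySem.Set String × List (List String)))
    (g0 : List String) (st0 : PySem.Set String × List (List String)) :
    ms.foldl (fun acc m =>
        if s ∈ m then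
          m.foldl (fun (acc : List String × (PySem.Set String × List (List String))) t =>
            if t ≠ s then (acc.1 ++ [t], f t acc.2) else acc) acc
        else acc) (g0, st0)
      = (g0 ++ (ms.filter (fun m => s ∈ m)).flatMap (fun m => m.filter (fun t => t ≠ s)),
         ((ms.filter (fun m => s ∈ m)).flatMap (fun m => m.filter (fun t => t ≠ s))).foldl
           (fun st t => f t st) st0) := by
  induction ms generalizing g0 st0 with
  | nil => simp
  | cons m ms ih =>
    rw [List.foldl_cons]
    by_cases hm : s ∈ m
    · rw [if_pos hm, pvPairFold, ih]
      simp [hm, List.foldl_append]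
    · rw [if_neg hm, ih]
      simp [hm]

theorem pvIdx_getD (synonyms : List (List String)) (s : String) :
    (pvIdxB synonyms).getD s [] = synonyms.filter (fun m => s ∈ m) := by
  unfold pvIdxB
  rw [pvIdx_fold]
  simp

theorem pvDfs_eq (synonyms : List (List String)) (fuel : Nat) :
    pvDfsA synonyms fuel = pvDfsB (pvIdxB synonyms) fuel := by
  induction fuel with
  | zero => funext s st; cases st; rfl
  | succ fuel ih =>
    funext s st
    cases st with
    | mk v g =>
      show pvDfsA synonyms (fuel+1) s (v, g) = pvDfsB (pvIdxB synonyms) (fuel+1) s (v, g)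
      simp only [pvDfsA, pvDfsB]
      by_cases hv : s ∈ v
      · simp [hv]
      · simp only [hv, ite_false]
        rw [pvIdx_getD, pvGuardedFolds synonyms s (pvDfsA synonyms fuel) [s] (PySem.Set.add v s, g)]
        simp [ih]

-- ===== VERDICT (by name: the statement is the Claim_ definition above) =====
theorem find_synonym_groups_spec : Claim_equal_find_synonym_groups := by
  intro synonyms _
  unfold Spec_find_synonym_groups find_synonym_groups find_synonym_groups_alt
  simp [pvDfs_eq]
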